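-- pv_equiv track=rewrite | github.com/tytusdb/tytusdb | parser/fase2/team26/G26/optimizar.py | operandosr8
-- ===== SOURCE A (Python) =====
-- def operandosr8(texto):
--     newText = ""
--     flag = True
--     for i in texto:
--         if i == "=":
--             flag = False
--         if flag and i != "=" and i!=" ":
--                 newText += i
--     return newText
-- ===== SOURCE B (Python) =====
-- def operandosr8(texto):
--     prefix = texto.partition('=')[0]
--     return ''.join(c for c in prefix if c != ' ')
-- ===== Notes on version B (the rewrite author's own statement) =====
-- stated objective: idiomatic
-- what changed: Replaces the flag-guarded single character loop with a two-step decomposition: isolate the prefix before the first separator with str.partition, then drop spaces with a filtering join.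
import Mathlib
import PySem

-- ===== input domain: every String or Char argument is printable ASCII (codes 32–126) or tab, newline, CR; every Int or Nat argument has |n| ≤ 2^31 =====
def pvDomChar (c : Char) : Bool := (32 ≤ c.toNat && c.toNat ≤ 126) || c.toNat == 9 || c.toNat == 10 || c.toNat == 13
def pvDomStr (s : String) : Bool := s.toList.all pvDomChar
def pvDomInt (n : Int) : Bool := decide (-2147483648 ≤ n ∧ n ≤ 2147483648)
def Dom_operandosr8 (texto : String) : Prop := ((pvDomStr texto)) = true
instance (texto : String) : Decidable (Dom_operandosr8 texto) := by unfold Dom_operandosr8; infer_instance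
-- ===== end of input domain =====

-- ===== PORT A =====
-- B changes only the decomposition (prefix-then-filter instead of a flagged loop); not claimed faster.
-- loop of A: newText/flag threaded through the characters exactly as in the Python source
def operandosr8Loop : List Char → String → Bool → String
  | [], acc, _ => acc
  | i :: rest, acc, flag =>
      let flag' := if i = '=' then false else flag
      let acc' := if flag' ∧ i ≠ '=' ∧ i ≠ ' ' then acc.push i else acc
      operandosr8Loop rest acc' flag'

def operandosr8 (texto : String) : String :=
  operandosr8Loop texto.toList "" true

-- ===== PORT B =====
-- texto.partition('=')[0] is the prefix before the first '=': exactly takeWhile (· ≠ '=') (exact, single-char sep)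
def operandosr8_alt (texto : String) : String :=
  let pre := texto.toList.takeWhile (· ≠ '=')
  String.ofList (pre.filter (· ≠ ' '))

-- ===== PRECONDITION & SPEC =====
def Spec_operandosr8 (texto : String) (out : String) : Prop := out = operandosr8_alt texto
instance (texto : String) (out : String) : Decidable (Spec_operandosr8 texto out) := by unfold Spec_operandosr8; infer_instance

-- ===== CLAIM (what is proved, stated in full; the proofs are below) =====
def Claim_equal_operandosr8 : Prop := ∀ (texto : String), Dom_operandosr8 texto → Spec_operandosr8 texto (operandosr8 texto)

-- ===== LEMMAS AND PROOFS =====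
theorem operandosr8Loop_false (l : List Char) (acc : String) :
    operandosr8Loop l acc false = acc := by
  induction l generalizing acc with
  | nil => rfl
  | cons i rest ih =>
      simp only [operandosr8Loop]
      split <;> simp_all

theorem operandosr8Loop_true (l : List Char) (acc : String) :
    operandosr8Loop l acc true
      = acc ++ String.ofList ((l.takeWhile (· ≠ '=')).filter (· ≠ ' ')) := by
  induction l generalizing acc with
  | nil =>
      simp only [operandosr8Loop, List.takeWhile, List.filter]
      apply (String.toList_inj.mp ?_).symm
      simp
  | cons i rest ih =>
      by_cases h : i = '='
      · subst h
        rw [show operandosr8Loop ('=' :: rest) acc true = acc by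
              simp [operandosr8Loop, operandosr8Loop_false]]
        apply (String.toList_inj.mp ?_).symm
        simp
      · by_cases hs : i = ' '
        · subst hs
          simp [operandosr8Loop, ih, List.takeWhile, h]
        · rw [show operandosr8Loop (i :: rest) acc true = operandosr8Loop rest (acc.push i) true by
                simp [operandosr8Loop, h, hs]]
          rw [ih]
          apply String.toList_inj.mp
          simp [List.takeWhile, h, hs]

-- ===== VERDICT (by name: the statement is the Claim_ definition above) =====
theorem operandosr8_spec : Claim_equal_operandosr8 := by
  intro texto _
  unfold Spec_operandosr8 operandosr8 operandosr8_alt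
  rw [operandosr8Loop_true]
  apply String.toList_inj.mp
  simp
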